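-- pv_equiv track=rewrite | github.com/ricott1/dingus | dingus/utils.py | convert_uint_array
-- ===== SOURCE A (Python) =====
-- def convert_uint_array(uint_array: list[int], from_bits: int, to_bits: int) -> list[int]:
--     max_value = (1 << to_bits) - 1
--     accumulator = 0
--     bits = 0
--     result = []
--     for p in range(len(uint_array)):
--         byte = uint_array[p]
--         # check that the entry is a value between 0 and 2^frombits-1
--         if (byte < 0 or byte >> from_bits != 0):
--             return []
--
--         accumulator = (accumulator << from_bits) | byte
--         bits += from_bits
--         while (bits >= to_bits):
--             bits -= to_bits
--             result.append((accumulator >> bits) & max_value)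
--
--     return result
-- ===== SOURCE B (Python) =====
-- def convert_uint_array(uint_array: list[int], from_bits: int, to_bits: int) -> list[int]:
--     max_value = (1 << to_bits) - 1
--     # pass 1: validate every entry and pack the whole input into one big integer
--     total = 0
--     for byte in uint_array:
--         if byte < 0 or byte >> from_bits != 0:
--             return []
--         total = (total << from_bits) | byte
--     # pass 2: slice the concatenated bitstream into to_bits-wide chunks by index
--     total_bits = from_bits * len(uint_array)
--     n = total_bits // to_bits
--     return [(total >> (total_bits - (i + 1) * to_bits)) & max_value for i in range(n)]
-- ===== Notes on version B (the rewrite author's own statement) =====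
-- stated objective: alternative
-- what changed: B replaces A's interleaved accumulator-and-bit-counter streaming (inner while loop emitting chunks as bits accumulate) with two separate passes: first validate every entry and pack the whole input into one big integer, then slice that bitstream into to_bits-wide chunks by index.
-- outside the precondition, e.g. on convert_uint_array([], 5, 0): A returns [], B raises ZeroDivisionError
import Mathlib
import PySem

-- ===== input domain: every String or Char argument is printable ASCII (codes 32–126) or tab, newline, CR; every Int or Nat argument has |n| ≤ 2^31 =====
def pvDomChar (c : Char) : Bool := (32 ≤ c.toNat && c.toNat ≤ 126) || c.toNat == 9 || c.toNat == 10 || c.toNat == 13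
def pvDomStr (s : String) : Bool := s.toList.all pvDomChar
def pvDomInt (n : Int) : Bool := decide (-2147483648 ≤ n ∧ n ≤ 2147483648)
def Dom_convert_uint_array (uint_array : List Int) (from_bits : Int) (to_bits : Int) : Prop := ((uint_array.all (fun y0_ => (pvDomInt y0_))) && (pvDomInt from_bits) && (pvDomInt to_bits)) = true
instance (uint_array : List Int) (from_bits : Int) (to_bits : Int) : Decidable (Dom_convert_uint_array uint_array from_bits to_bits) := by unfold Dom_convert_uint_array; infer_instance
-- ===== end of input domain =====

-- B regroups the bit stream in two separate passes (validate-and-pack everything into one big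
-- integer, then slice it by index) instead of A's interleaved accumulator-and-counter streaming;
-- objective: alternative decomposition, same exact results.

-- ===== PORT A =====
-- All shift/and/or arithmetic happens on nonnegative values under Pre_, so the ports carry the
-- accumulator/counter state as Nat; `x >> k` is `>>>`, `x & max_value` is `&&&`, `|` is `|||`,
-- exact for the nonnegative operands Python reaches here (negative shift counts raise in Python
-- and lie outside Pre_).
-- the inner `while (bits >= to_bits)` loop; fuel = the starting `bits` suffices since each
-- iteration removes to_bits ≥ 1 bits (to_bits ≤ 0 lies outside Pre_)
def cuaWhile (t maxv : Nat) : Nat → Nat → Nat → List Int → Nat × List Int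
  | 0, bits, _, res => (bits, res)
  | fuel + 1, bits, acc, res =>
    if t ≤ bits then
      cuaWhile t maxv fuel (bits - t) acc (res ++ [Int.ofNat ((acc >>> (bits - t)) &&& maxv)])
    else (bits, res)

-- the `for p in range(len(uint_array))` loop with its early `return []`
def cuaGo (f t maxv : Nat) : List Int → Nat → Nat → List Int → List Int
  | [], _, _, res => res
  | b :: rest, acc, bits, res =>
    if b < 0 ∨ b.toNat >>> f ≠ 0 then []
    else
      let acc' := (acc <<< f) ||| b.toNat
      let bits' := bits + f
      let p := cuaWhile t maxv bits' bits' acc' res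
      cuaGo f t maxv rest acc' p.1 p.2

def convert_uint_array (uint_array : List Int) (from_bits : Int) (to_bits : Int) : List Int :=
  cuaGo from_bits.toNat to_bits.toNat ((1 <<< to_bits.toNat) - 1) uint_array 0 0 []

-- ===== PORT B =====
-- pass 1 of Source B: validate every entry and pack the input into one big integer (early return [] = none)
def cuaFold (f : Nat) : List Int → Nat → Option Nat
  | [], total => some total
  | b :: rest, total =>
    if b < 0 ∨ b.toNat >>> f ≠ 0 then none
    else cuaFold f rest ((total <<< f) ||| b.toNat)

def convert_uint_array_alt (uint_array : List Int) (from_bits : Int) (to_bits : Int) : List Int :=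
  let f := from_bits.toNat
  let t := to_bits.toNat
  let maxv := (1 <<< t) - 1
  match cuaFold f uint_array 0 with
  | none => []
  | some total =>
    let total_bits := f * uint_array.length
    let n := total_bits / t
    (List.range n).map (fun i => Int.ofNat ((total >>> (total_bits - (i + 1) * t)) &&& maxv))

-- ===== PRECONDITION & SPEC =====
-- Pre_ excludes exactly the inputs where A does not return a value B could match: negative to_bits
-- (A raises ValueError at `1 << to_bits`); from_bits < 0 with a nonnegative first entry (A raises
-- ValueError at `byte >> from_bits`); and to_bits == 0 unless the first entry already fails the
-- validation check, because there A loops forever on a valid non-empty array and returns [] on the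
-- empty array only because the failing division is never reached (B raises ZeroDivisionError there).
def Pre_convert_uint_array (uint_array : List Int) (from_bits : Int) (to_bits : Int) : Prop :=
  (0 ≤ from_bits ∨ uint_array = [] ∨ uint_array.head?.getD 0 < 0) ∧
  (1 ≤ to_bits ∨ (0 ≤ to_bits ∧ (uint_array.head?.getD 0 < 0 ∨
    (0 ≤ from_bits ∧ uint_array ≠ [] ∧ 2 ^ from_bits.toNat ≤ (uint_array.head?.getD 0).toNat))))
instance (uint_array : List Int) (from_bits : Int) (to_bits : Int) : Decidable (Pre_convert_uint_array uint_array from_bits to_bits) := by unfold Pre_convert_uint_array; infer_instance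
def pvWitness_convert_uint_array : List Int × Int × Int := ([3, 1], 2, 3)

def Spec_convert_uint_array (uint_array : List Int) (from_bits : Int) (to_bits : Int) (out : List Int) : Prop := out = convert_uint_array_alt uint_array from_bits to_bits
instance (uint_array : List Int) (from_bits : Int) (to_bits : Int) (out : List Int) : Decidable (Spec_convert_uint_array uint_array from_bits to_bits out) := by unfold Spec_convert_uint_array; infer_instance

-- ===== CLAIM (what is proved, stated in full; the proofs are below) =====
def Claim_equal_convert_uint_array : Prop := ∀ (uint_array : List Int) (from_bits : Int) (to_bits : Int), Dom_convert_uint_array uint_array from_bits to_bits → Pre_convert_uint_array uint_array from_bits to_bits → Spec_convert_uint_array uint_array from_bits to_bits (convert_uint_array uint_array from_bits to_bits)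

-- ===== LEMMAS AND PROOFS =====

-- the packed value of a list of entries, as plain arithmetic
def totN (f : Nat) (xs : List Int) : Nat := xs.foldl (fun a b => a * 2 ^ f + b.toNat) 0

lemma pvShOr (x f b : Nat) (hb : b < 2 ^ f) : (x <<< f) ||| b = x * 2 ^ f + b := by
  rw [← Nat.shiftLeft_add_eq_or_of_lt hb, Nat.shiftLeft_eq]

lemma pvValidIff (f : Nat) (b : Int) :
    (b < 0 ∨ b.toNat >>> f ≠ 0) ↔ ¬(0 ≤ b ∧ b.toNat < 2 ^ f) := by
  rw [Nat.shiftRight_eq_div_pow, Ne, Nat.div_eq_zero_iff]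
  have := Nat.two_pow_pos f
  omega

lemma totN_from (f : Nat) :
    ∀ (xs : List Int) (a : Nat),
      xs.foldl (fun a b => a * 2 ^ f + b.toNat) a = a * 2 ^ (f * xs.length) + totN f xs := by
  intro xs
  induction xs with
  | nil => intro a; simp [totN]
  | cons b rest ih =>
    intro a
    have hcons : totN f (b :: rest) = b.toNat * 2 ^ (f * rest.length) + totN f rest := by
      simp only [totN, List.foldl_cons, Nat.zero_mul, Nat.zero_add]
      exact ih b.toNat
    simp only [List.foldl_cons, hcons, List.length_cons]
    rw [ih (a * 2 ^ f + b.toNat)]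
    have : 2 ^ (f * (rest.length + 1)) = 2 ^ f * 2 ^ (f * rest.length) := by
      rw [← Nat.pow_add]; ring_nf
    rw [this]; ring

lemma totN_lt (f : Nat) :
    ∀ (xs : List Int), (∀ b ∈ xs, b.toNat < 2 ^ f) → totN f xs < 2 ^ (f * xs.length) := by
  intro xs
  induction xs with
  | nil => intro _; simp [totN]
  | cons b rest ih =>
    intro h
    have hcons : totN f (b :: rest) = b.toNat * 2 ^ (f * rest.length) + totN f rest := by
      simp only [totN, List.foldl_cons, Nat.zero_mul, Nat.zero_add]
      exact totN_from f rest b.toNat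
    have hb : b.toNat < 2 ^ f := h b (by simp)
    have hr : totN f rest < 2 ^ (f * rest.length) := ih (fun x hx => h x (by simp [hx]))
    have hpow : 2 ^ (f * (rest.length + 1)) = 2 ^ f * 2 ^ (f * rest.length) := by
      rw [← Nat.pow_add]; ring_nf
    rw [hcons, List.length_cons, hpow]
    calc b.toNat * 2 ^ (f * rest.length) + totN f rest
        < (b.toNat + 1) * 2 ^ (f * rest.length) := by
          have := Nat.two_pow_pos (f * rest.length); nlinarith
      _ ≤ 2 ^ f * 2 ^ (f * rest.length) := by
          have : b.toNat + 1 ≤ 2 ^ f := hb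
          exact Nat.mul_le_mul_right _ this

lemma fold_eq (f : Nat) :
    ∀ (xs : List Int) (total : Nat),
      cuaFold f xs total =
        if ∀ b ∈ xs, 0 ≤ b ∧ b.toNat < 2 ^ f then
          some (xs.foldl (fun a b => a * 2 ^ f + b.toNat) total)
        else none := by
  intro xs
  induction xs with
  | nil => intro total; simp [cuaFold]
  | cons b rest ih =>
    intro total
    by_cases hb : 0 ≤ b ∧ b.toNat < 2 ^ f
    · have hv : ¬(b < 0 ∨ b.toNat >>> f ≠ 0) := by rw [pvValidIff]; exact not_not_intro hb
      simp only [cuaFold, if_neg hv, ih, pvShOr total f b.toNat hb.2, List.forall_mem_cons,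
        List.foldl_cons]
      by_cases hrest : ∀ x ∈ rest, 0 ≤ x ∧ x.toNat < 2 ^ f
      · rw [if_pos hrest, if_pos ⟨hb, hrest⟩]
      · rw [if_neg hrest, if_neg (fun h => hrest h.2)]
    · have hv : b < 0 ∨ b.toNat >>> f ≠ 0 := (pvValidIff f b).2 hb
      simp only [cuaFold, if_pos hv, List.forall_mem_cons]
      rw [if_neg (fun h => hb h.1)]

lemma while_eq (t maxv : Nat) (ht : 1 ≤ t) (hm : maxv = 2 ^ t - 1) :
    ∀ (fuel bits acc : Nat) (res : List Int), bits ≤ fuel →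
      cuaWhile t maxv fuel bits acc res =
        (bits % t,
         res ++ (List.range (bits / t)).map
           (fun i => Int.ofNat (acc / 2 ^ (bits - (i + 1) * t) % 2 ^ t))) := by
  intro fuel
  induction fuel with
  | zero =>
    intro bits acc res hle
    interval_cases bits
    simp [cuaWhile, Nat.zero_mod, Nat.zero_div]
  | succ fuel ih =>
    intro bits acc res hle
    by_cases hb : t ≤ bits
    · have hentry : Int.ofNat ((acc >>> (bits - t)) &&& maxv)
          = Int.ofNat (acc / 2 ^ (bits - 1 * t) % 2 ^ t) := by
        rw [hm, Nat.and_two_pow_sub_one_eq_mod, Nat.shiftRight_eq_div_pow, Nat.one_mul]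
      simp only [cuaWhile, if_pos hb]
      rw [ih (bits - t) acc _ (by omega)]
      have hmod : (bits - t) % t = bits % t := by
        conv_rhs => rw [show bits = (bits - t) + t by omega]
        rw [Nat.add_mod_right]
      have hdiv : bits / t = (bits - t) / t + 1 := by
        conv_lhs => rw [show bits = (bits - t) + t by omega]
        rw [Nat.add_div_right _ (by omega)]
      rw [hmod, hdiv, List.range_succ_eq_map]
      simp only [List.map_cons, List.map_map, Nat.zero_add]
      rw [hentry]
      simp only [List.append_assoc, List.singleton_append]
      congr 3
      apply List.map_congr_left
      intro i _
      simp only [Function.comp_apply]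
      congr 2
      have h1 : Nat.succ i + 1 = i + 2 := by omega
      have h2 : (i + 2) * t = t + (i + 1) * t := by ring
      rw [h1, h2, Nat.sub_sub]
    · simp only [cuaWhile, if_neg hb]
      rw [Nat.mod_eq_of_lt (by omega), Nat.div_eq_of_lt (by omega)]
      simp

lemma go_eq (f t maxv : Nat) (ht : 1 ≤ t) (hm : maxv = 2 ^ t - 1) :
    ∀ (xs : List Int) (acc bits : Nat) (res : List Int), bits < t →
      cuaGo f t maxv xs acc bits res =
        if ∀ b ∈ xs, 0 ≤ b ∧ b.toNat < 2 ^ f then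
          res ++ (List.range ((bits + f * xs.length) / t)).map
            (fun i => Int.ofNat
              ((acc * 2 ^ (f * xs.length) + totN f xs) / 2 ^ (bits + f * xs.length - (i + 1) * t) % 2 ^ t))
        else []
      := by
  intro xs
  induction xs with
  | nil =>
    intro acc bits res hbits
    rw [if_pos (by simp)]
    simp [cuaGo, Nat.div_eq_of_lt (by simpa using hbits)]
  | cons b rest ih =>
    intro acc bits res hbits
    by_cases hb : 0 ≤ b ∧ b.toNat < 2 ^ f
    · have hv : ¬(b < 0 ∨ b.toNat >>> f ≠ 0) := by rw [pvValidIff]; exact not_not_intro hb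
      simp only [cuaGo, if_neg hv]
      rw [pvShOr acc f b.toNat hb.2]
      set acc' := acc * 2 ^ f + b.toNat with hacc'
      set bits' := bits + f with hbits'
      rw [while_eq t maxv ht hm bits' bits' acc' res le_rfl]
      rw [ih acc' (bits' % t) _ (Nat.mod_lt _ (by omega))]
      by_cases hrest : ∀ x ∈ rest, 0 ≤ x ∧ x.toNat < 2 ^ f
      · rw [if_pos hrest, if_pos (show ∀ x ∈ b :: rest, 0 ≤ x ∧ x.toNat < 2 ^ f by rw [List.forall_mem_cons]; exact ⟨hb, hrest⟩)]
        set m := rest.length with hm'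
        have hcons : totN f (b :: rest) = b.toNat * 2 ^ (f * m) + totN f rest := by
          simp only [totN, List.foldl_cons, Nat.zero_mul, Nat.zero_add]
          exact totN_from f rest b.toNat
        have hpow : 2 ^ (f * (m + 1)) = 2 ^ f * 2 ^ (f * m) := by rw [← Nat.pow_add]; ring_nf
        have hT : acc * 2 ^ (f * (m + 1)) + totN f (b :: rest)
            = acc' * 2 ^ (f * m) + totN f rest := by
          rw [hcons, hacc', hpow]; ring
        have hrlt : totN f rest < 2 ^ (f * m) := totN_lt f rest (fun x hx => (hrest x hx).2)
        have hTdiv : ∀ s : Nat, (acc' * 2 ^ (f * m) + totN f rest) / 2 ^ (f * m + s) = acc' / 2 ^ s := by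
          intro s
          rw [Nat.pow_add, ← Nat.div_div_eq_div_mul,
            Nat.mul_comm acc' (2 ^ (f * m)), Nat.mul_add_div (Nat.two_pow_pos _),
            Nat.div_eq_of_lt hrlt, Nat.add_zero]
        have hdm := Nat.div_add_mod bits' t
        have hlen : (b :: rest).length = m + 1 := by simp [hm']
        have hn : (bits + f * (m + 1)) / t = bits' / t + (bits' % t + f * m) / t := by
          have h1 : bits + f * (m + 1) = t * (bits' / t) + (bits' % t + f * m) := by
            have h3 : bits + f * (m + 1) = bits' + f * m := by rw [hbits']; ring
            omega
          rw [h1, Nat.mul_add_div (by omega)]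
        rw [hlen, hn, List.range_add, List.map_append, List.map_map, hT]
        dsimp only
        rw [List.append_assoc]
        congr 1
        congr 1
        · -- first block: entries produced by the while loop on this element
          apply List.map_congr_left
          intro i hi
          have hi' : i < bits' / t := List.mem_range.1 hi
          have hle : (i + 1) * t ≤ bits' := by
            calc (i + 1) * t ≤ bits' / t * t := Nat.mul_le_mul_right _ (by omega)
              _ ≤ bits' := Nat.div_mul_le_self _ _
          have hexp : bits + f * (m + 1) - (i + 1) * t = f * m + (bits' - (i + 1) * t) := by
            have h3 : bits + f * (m + 1) = bits' + f * m := by rw [hbits']; ring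
            omega
          rw [hexp, hTdiv]
        · -- second block: entries produced while consuming the rest of the list
          apply List.map_congr_left
          intro i hi
          have hi' : i < (bits' % t + f * m) / t := List.mem_range.1 hi
          simp only [Function.comp_apply]
          have hle : (i + 1) * t ≤ bits' % t + f * m := by
            calc (i + 1) * t ≤ (bits' % t + f * m) / t * t := Nat.mul_le_mul_right _ (by omega)
              _ ≤ _ := Nat.div_mul_le_self _ _
          have hexp : bits + f * (m + 1) - (bits' / t + i + 1) * t
              = bits' % t + f * m - (i + 1) * t := by
            have h2 : (bits' / t + i + 1) * t = t * (bits' / t) + (i + 1) * t := by ring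
            have h3 : bits + f * (m + 1) = bits' + f * m := by rw [hbits']; ring
            omega
          rw [hexp]
      · rw [if_neg hrest, if_neg (fun h : ∀ x ∈ b :: rest, 0 ≤ x ∧ x.toNat < 2 ^ f => hrest ((List.forall_mem_cons).1 h).2)]
    · have hv : b < 0 ∨ b.toNat >>> f ≠ 0 := (pvValidIff f b).2 hb
      simp only [cuaGo, if_pos hv, List.forall_mem_cons]
      rw [if_neg (fun h => hb h.1)]

-- ===== VERDICT (by name: the statement is the Claim_ definition above) =====
theorem convert_uint_array_spec : Claim_equal_convert_uint_array := by
  intro ua fb tb _ hpre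
  obtain ⟨_, htdisj⟩ := hpre
  rcases htdisj with htb | ⟨_, hbad⟩
  · -- to_bits ≥ 1: the main equivalence
    have ht : 1 ≤ tb.toNat := by omega
    set f := fb.toNat with hf
    set t := tb.toNat with htdef
    have hm : (1 <<< t) - 1 = 2 ^ t - 1 := by rw [Nat.shiftLeft_eq, Nat.one_mul]
    simp only [Spec_convert_uint_array, convert_uint_array, convert_uint_array_alt, ← hf, ← htdef]
    rw [go_eq f t _ ht hm ua 0 0 [] (by omega), fold_eq f ua 0]
    by_cases hv : ∀ b ∈ ua, 0 ≤ b ∧ b.toNat < 2 ^ f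
    · rw [if_pos hv, if_pos hv]
      simp only [List.nil_append, Nat.zero_mul, Nat.zero_add]
      apply List.map_congr_left
      intro i _
      rw [hm, Nat.and_two_pow_sub_one_eq_mod, Nat.shiftRight_eq_div_pow]
      rfl
    · rw [if_neg hv, if_neg hv]
  · -- to_bits == 0 with an invalid first entry: both programs return [] immediately
    match ua, hbad with
    | [], Or.inl h => simp at h
    | [], Or.inr h => exact absurd rfl h.2.1
    | h :: rest, hbad =>
      have hc : h < 0 ∨ h.toNat >>> fb.toNat ≠ 0 := by
        rcases hbad with hneg | ⟨_, _, hbig⟩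
        · exact Or.inl (by simpa using hneg)
        · right
          rw [Nat.shiftRight_eq_div_pow, Ne, Nat.div_eq_zero_iff]
          have := Nat.two_pow_pos fb.toNat
          simp only [List.head?_cons, Option.getD_some] at hbig
          omega
      simp only [Spec_convert_uint_array, convert_uint_array, convert_uint_array_alt,
        cuaGo, cuaFold, if_pos hc]
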